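-- pv_equiv track=rewrite | github.com/michalsosn/advent-of-code-2022 | 25_hot_air/main.py | code_to_num
-- ===== SOURCE A (Python) =====
-- def code_to_num(code):
--     base = 5
--     code_values = {
--         '=': -2, '-': -1, '0': 0, '1': 1, '2': 2
--     }
--     result = 0
--     for c in code:
--         val = code_values[c]
--         result = result * base + val
--     return result
-- ===== SOURCE B (Python) =====
-- def code_to_num(code):
--     base = 5
--     code_values = {
--         '=': -2, '-': -1, '0': 0, '1': 1, '2': 2
--     }
--     total = 0
--     power = 1
--     for c in reversed(code):
--         total += code_values[c] * power
--         power *= base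
--     return total
-- ===== Notes on version B (the rewrite author's own statement) =====
-- stated objective: alternative
-- what changed: Replaces Horner's most-significant-first accumulator (result = result*5 + val) with a least-significant-first pass over reversed(code) that keeps an explicit place-value `power` and sums code_values[c]*power.
import Mathlib
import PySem

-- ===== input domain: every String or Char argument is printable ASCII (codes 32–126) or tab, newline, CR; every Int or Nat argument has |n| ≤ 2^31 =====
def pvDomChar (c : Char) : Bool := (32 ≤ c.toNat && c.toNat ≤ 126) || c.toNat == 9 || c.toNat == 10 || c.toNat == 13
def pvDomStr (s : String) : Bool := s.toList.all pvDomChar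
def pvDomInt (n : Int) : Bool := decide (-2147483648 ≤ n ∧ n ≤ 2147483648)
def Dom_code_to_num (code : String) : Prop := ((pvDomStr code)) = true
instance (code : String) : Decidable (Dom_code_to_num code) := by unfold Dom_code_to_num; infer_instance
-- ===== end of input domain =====

-- B replaces Horner's most-significant-first accumulator with a least-significant-first
-- pass over the reversed string keeping an explicit place-value `power`; same results.
-- Pre_ excludes strings containing a character outside '=-012', where A raises KeyError.

-- ===== PORT A =====
-- the digit-value dict shared by both Pythons
def pvCodeValues : PySem.Dict Char Int :=
  PySem.Dict.ofList [('=', -2), ('-', -1), ('0', 0), ('1', 1), ('2', 2)]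

-- A: result = 0; for c in code: result = result*5 + code_values[c]
-- (KeyError on an unknown character: excluded by Pre_; getD's default is never used there)
def code_to_num (code : String) : Int :=
  code.toList.foldl (fun result c => result * 5 + pvCodeValues.getD c 0) 0

-- ===== PORT B =====
-- B: total = 0; power = 1; for c in reversed(code): total += code_values[c]*power; power *= 5
def code_to_num_alt (code : String) : Int :=
  (code.toList.reverse.foldl
    (fun (s : Int × Int) c => (s.1 + pvCodeValues.getD c 0 * s.2, s.2 * 5)) (0, 1)).1

-- ===== PRECONDITION & SPEC =====
-- exactly the inputs where A (and B) return: every character is a SNAFU digit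
def Pre_code_to_num (code : String) : Prop :=
  (code.toList.all (fun c => c == '=' || c == '-' || c == '0' || c == '1' || c == '2')) = true
instance (code : String) : Decidable (Pre_code_to_num code) := by
  unfold Pre_code_to_num; infer_instance
def pvWitness_code_to_num : String := "1=-0"

def Spec_code_to_num (code : String) (out : Int) : Prop := out = code_to_num_alt code
instance (code : String) (out : Int) : Decidable (Spec_code_to_num code out) := by
  unfold Spec_code_to_num; infer_instance

-- ===== CLAIM (what is proved, stated in full; the proofs are below) =====
def Claim_equal_code_to_num : Prop :=
  ∀ (code : String), Dom_code_to_num code → Pre_code_to_num code →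
    Spec_code_to_num code (code_to_num code)

-- ===== LEMMAS AND PROOFS =====

-- W l = value of l read as little-endian SNAFU digits
def pvW (l : List Char) : Int :=
  match l with
  | [] => 0
  | c :: l' => pvCodeValues.getD c 0 + 5 * pvW l'

theorem pvW_append_singleton (m : List Char) (c : Char) :
    pvW (m ++ [c]) = pvW m + pvCodeValues.getD c 0 * 5 ^ m.length := by
  induction m with
  | nil => simp [pvW]
  | cons d m ih => simp [pvW, ih, pow_succ]; ring

theorem pvA_foldl (l : List Char) (r : Int) :
    l.foldl (fun result c => result * 5 + pvCodeValues.getD c 0) r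
      = r * 5 ^ l.length + pvW l.reverse := by
  induction l generalizing r with
  | nil => simp [pvW]
  | cons c l ih =>
      simp only [List.foldl_cons, ih, List.reverse_cons, pvW_append_singleton,
        List.length_reverse, List.length_cons, pow_succ]
      ring

theorem pvB_foldl (m : List Char) (t p : Int) :
    (m.foldl (fun (s : Int × Int) c => (s.1 + pvCodeValues.getD c 0 * s.2, s.2 * 5)) (t, p)).1
      = t + p * pvW m := by
  induction m generalizing t p with
  | nil => simp [pvW]
  | cons c m ih => simp [pvW, ih]; ring

-- ===== VERDICT (by name: the statement is the Claim_ definition above) =====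
theorem code_to_num_spec : Claim_equal_code_to_num := by
  intro code _ _
  unfold Spec_code_to_num code_to_num code_to_num_alt
  rw [pvA_foldl, pvB_foldl]
  ring
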